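-- pv_equiv track=rewrite | github.com/CENdetectHOR/CENdetectHOR_pipeline | scripts/Extract5mon_NOcons.py | mon_extr_nocons
-- ===== SOURCE A (Python) =====
-- from collections import defaultdict
--
-- def mon_extr_nocons(seq, min_mon, max_mon, Nmin_mons, monLen,k):
--     seq = str(seq)
--     kmer_pos = defaultdict(list)
--     for i in range(len(seq) - k + 1):
--         kmer = seq[i:i+k]
--         kmer_pos[kmer].append(i)
--     for kmer, positions in kmer_pos.items():
--         if len(positions) < 2:
--             continue
--         mon_list = []
--         prev = positions[0]
--         for pos in positions[1:]:
--             mon_len = pos - prev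
--             if min_mon < mon_len < max_mon:
--                 mon_list.append(seq[prev:pos])
--             prev = pos
--         if len(mon_list) > int(Nmin_mons):
--             fin_mon_list = [m for m in mon_list if len(m) == monLen]
--             return fin_mon_list
-- ===== SOURCE B (Python) =====
-- def mon_extr_nocons(seq, min_mon, max_mon, Nmin_mons, monLen, k):
--     seq = str(seq)
--     # one accumulating pass: kmer -> [prev_pos, occurrences, valid_gap_count, monomers_of_len_monLen]
--     agg = {}
--     for i in range(len(seq) - k + 1):
--         kmer = seq[i:i+k]
--         entry = agg.get(kmer)
--         if entry is None:
--             agg[kmer] = [i, 1, 0, []]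
--         else:
--             prev = entry[0]
--             gap = i - prev
--             if min_mon < gap < max_mon:
--                 entry[2] += 1
--                 sub = seq[prev:i]
--                 if len(sub) == monLen:
--                     entry[3].append(sub)
--             entry[0] = i
--             entry[1] += 1
--     for _, occ, cnt, mons in agg.values():
--         if occ >= 2 and cnt > int(Nmin_mons):
--             return mons
--     return None
-- ===== Notes on version B (the rewrite author's own statement) =====
-- stated objective: alternative
-- what changed: A materialises every k-mer's full position list and then rescans each list in a second phase; B makes one accumulating pass that keeps per k-mer only (previous position, occurrence count, valid-gap count, monomers of length monLen) and decides from those aggregates, never storing or rescanning position lists.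
import Mathlib
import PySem

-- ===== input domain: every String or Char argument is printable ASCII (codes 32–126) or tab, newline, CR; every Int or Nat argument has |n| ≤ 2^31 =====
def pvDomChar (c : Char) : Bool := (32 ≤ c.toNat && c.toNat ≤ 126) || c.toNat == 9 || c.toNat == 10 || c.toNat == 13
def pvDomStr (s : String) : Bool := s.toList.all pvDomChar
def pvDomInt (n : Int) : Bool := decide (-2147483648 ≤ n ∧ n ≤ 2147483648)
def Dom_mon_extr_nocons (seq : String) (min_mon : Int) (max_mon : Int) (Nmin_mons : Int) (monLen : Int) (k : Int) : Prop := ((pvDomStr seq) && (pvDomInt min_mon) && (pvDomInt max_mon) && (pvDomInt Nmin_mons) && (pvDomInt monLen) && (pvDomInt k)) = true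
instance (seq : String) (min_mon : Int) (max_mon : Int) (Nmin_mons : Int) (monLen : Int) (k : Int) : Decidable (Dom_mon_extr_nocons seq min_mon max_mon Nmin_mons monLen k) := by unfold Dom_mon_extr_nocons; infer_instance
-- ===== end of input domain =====

-- B replaces A's two phases (collect every position of every k-mer, then rescan each
-- position list) by ONE accumulating pass keeping per k-mer only (last position,
-- occurrence count, valid-gap count, monomers of length monLen); objective: alternative.

-- ===== PORT A =====
-- kmer_pos[kmer].append(i) on a defaultdict(list)
def pvAstep (cs : List Char) (kk : Int) (d : PySem.Dict (List Char) (List Int)) (i : Int) :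
    PySem.Dict (List Char) (List Int) :=
  let kmer := PySem.List.slice cs (some i) (some (i + kk))
  d.modify kmer [] (fun ps => ps ++ [i])

-- body of the 'for pos in positions[1:]:' loop: state = (mon_list, prev)
def pvFA (cs : List Char) (min_mon max_mon : Int) (st : List (List Char) × Int) (pos : Int) :
    List (List Char) × Int :=
  (if min_mon < pos - st.2 ∧ pos - st.2 < max_mon
     then st.1 ++ [PySem.List.slice cs (some st.2) (some pos)] else st.1, pos)

-- the 'for kmer, positions in kmer_pos.items():' loop
def pvAscan (cs : List Char) (min_mon max_mon Nmin_mons monLen : Int) :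
    List (List Char × List Int) → Option (List String)
  | [] => none
  | (_, positions) :: rest =>
    match positions with
    | [] => pvAscan cs min_mon max_mon Nmin_mons monLen rest      -- len(positions) < 2: continue
    | p0 :: ptail =>
      if ptail = [] then pvAscan cs min_mon max_mon Nmin_mons monLen rest   -- len(positions) < 2
      else
        let r := ptail.foldl (pvFA cs min_mon max_mon) ([], p0)
        if Nmin_mons < (r.1.length : Int) then
          some ((r.1.filter (fun m => (m.length : Int) == monLen)).map String.ofList)
        else pvAscan cs min_mon max_mon Nmin_mons monLen rest

def mon_extr_nocons (seq : String) (min_mon : Int) (max_mon : Int) (Nmin_mons : Int) (monLen : Int) (k : Int) : Option (List String) :=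
  let cs := seq.toList
  let d := (PySem.List.pyRange 0 ((cs.length : Int) - k + 1) 1).foldl (pvAstep cs k) PySem.Dict.empty
  pvAscan cs min_mon max_mon Nmin_mons monLen d.items

-- ===== PORT B =====
-- one accumulating step: kmer -> (prev position, occurrences, valid-gap count, monomers of length monLen)
def pvBstep (cs : List Char) (min_mon max_mon monLen kk : Int)
    (d : PySem.Dict (List Char) (Int × Int × Int × List (List Char))) (i : Int) :
    PySem.Dict (List Char) (Int × Int × Int × List (List Char)) :=
  let kmer := PySem.List.slice cs (some i) (some (i + kk))
  match d.get? kmer with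
  | none => d.insert kmer (i, 1, 0, [])
  | some (prev, c, cnt, lst) =>
    let gap := i - prev
    if min_mon < gap ∧ gap < max_mon then
      let sub := PySem.List.slice cs (some prev) (some i)
      d.insert kmer (i, c + 1, cnt + 1, if (sub.length : Int) == monLen then lst ++ [sub] else lst)
    else
      d.insert kmer (i, c + 1, cnt, lst)

-- the final 'for _, occ, cnt, mons in agg.values():' loop
def pvBfind (Nmin_mons : Int) : List (Int × Int × Int × List (List Char)) → Option (List String)
  | [] => none
  | (_, occ, cnt, mons) :: rest =>
    if 2 ≤ occ ∧ Nmin_mons < cnt then some (mons.map String.ofList)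
    else pvBfind Nmin_mons rest

def mon_extr_nocons_alt (seq : String) (min_mon : Int) (max_mon : Int) (Nmin_mons : Int) (monLen : Int) (k : Int) : Option (List String) :=
  let cs := seq.toList
  let d := (PySem.List.pyRange 0 ((cs.length : Int) - k + 1) 1).foldl
      (pvBstep cs min_mon max_mon monLen k) PySem.Dict.empty
  pvBfind Nmin_mons d.values

-- ===== PRECONDITION & SPEC =====
def Spec_mon_extr_nocons (seq : String) (min_mon : Int) (max_mon : Int) (Nmin_mons : Int) (monLen : Int) (k : Int) (out : Option (List String)) : Prop := out = mon_extr_nocons_alt seq min_mon max_mon Nmin_mons monLen k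
instance (seq : String) (min_mon : Int) (max_mon : Int) (Nmin_mons : Int) (monLen : Int) (k : Int) (out : Option (List String)) : Decidable (Spec_mon_extr_nocons seq min_mon max_mon Nmin_mons monLen k out) := by unfold Spec_mon_extr_nocons; infer_instance

-- ===== CLAIM (what is proved, stated in full; the proofs are below) =====
def Claim_equal_mon_extr_nocons : Prop := ∀ (seq : String) (min_mon : Int) (max_mon : Int) (Nmin_mons : Int) (monLen : Int) (k : Int), Dom_mon_extr_nocons seq min_mon max_mon Nmin_mons monLen k → Spec_mon_extr_nocons seq min_mon max_mon Nmin_mons monLen k (mon_extr_nocons seq min_mon max_mon Nmin_mons monLen k)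

-- ===== LEMMAS AND PROOFS =====

-- B's per-occurrence transition, as a function of the previously stored value (none = first occurrence)
def pvG (cs : List Char) (mm mx ml : Int) :
    Option (Int × Int × Int × List (List Char)) → Int → (Int × Int × Int × List (List Char))
  | none, i => (i, 1, 0, [])
  | some (prev, c, cnt, lst), i =>
    if mm < i - prev ∧ i - prev < mx then
      (i, c + 1, cnt + 1,
        if ((PySem.List.slice cs (some prev) (some i)).length : Int) == ml
          then lst ++ [PySem.List.slice cs (some prev) (some i)] else lst)
    else (i, c + 1, cnt, lst)

lemma pvBstep_eq (cs : List Char) (mm mx ml kk : Int)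
    (d : PySem.Dict (List Char) (Int × Int × Int × List (List Char))) (i : Int) :
    pvBstep cs mm mx ml kk d i =
      d.insert (PySem.List.slice cs (some i) (some (i + kk)))
        (pvG cs mm mx ml (d.get? (PySem.List.slice cs (some i) (some (i + kk)))) i) := by
  simp only [pvBstep, pvG]
  rcases h : d.get? (PySem.List.slice cs (some i) (some (i + kk))) with _ | ⟨prev, c, cnt, lst⟩ <;>
    simp [apply_ite (d.insert (PySem.List.slice cs (some i) (some (i + kk))))]

-- what B's fold stores for a key = pvG folded over that key's positions
lemma pvB_get (cs : List Char) (mm mx ml kk : Int) (l : List Int)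
    (d : PySem.Dict (List Char) (Int × Int × Int × List (List Char))) (key : List Char) :
    (l.foldl (pvBstep cs mm mx ml kk) d).get? key =
      (l.filter (fun i => PySem.List.slice cs (some i) (some (i + kk)) == key)).foldl
        (fun o i => some (pvG cs mm mx ml o i)) (d.get? key) := by
  induction l generalizing d with
  | nil => simp
  | cons i rest ih =>
    simp only [List.foldl_cons, List.filter_cons]
    by_cases hk : PySem.List.slice cs (some i) (some (i + kk)) == key
    · have hk' : key = PySem.List.slice cs (some i) (some (i + kk)) := (eq_of_beq hk).symm
      rw [ih, pvBstep_eq]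
      subst hk'
      simp only [PySem.Dict.get?_insert_self, hk, if_true, List.foldl_cons]
    · have hk' : key ≠ PySem.List.slice cs (some i) (some (i + kk)) := fun h => (by simp [h] at hk)
      rw [if_neg (by simpa using hk), ih]
      rw [pvBstep_eq, PySem.Dict.get?_insert_of_ne _ _ hk']

-- what A's fold stores for a key = that key's positions
lemma pvA_get (cs : List Char) (kk : Int) (l : List Int)
    (d : PySem.Dict (List Char) (List Int)) (key : List Char) :
    (l.foldl (pvAstep cs kk) d).getD key [] =
      d.getD key [] ++ l.filter (fun i => PySem.List.slice cs (some i) (some (i + kk)) == key) := by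
  induction l generalizing d with
  | nil => simp
  | cons i rest ih =>
    simp only [List.foldl_cons, List.filter_cons]
    by_cases hk : PySem.List.slice cs (some i) (some (i + kk)) == key
    · have hk' : key = PySem.List.slice cs (some i) (some (i + kk)) := (eq_of_beq hk).symm
      rw [hk, ih]
      simp only [pvAstep, hk']
      rw [PySem.Dict.getD_modify_self]
      simp
    · have hk' : key ≠ PySem.List.slice cs (some i) (some (i + kk)) := fun h => (by simp [h] at hk)
      rw [if_neg (by simpa using hk), ih]
      simp only [pvAstep]
      rw [PySem.Dict.getD_modify_of_ne _ _ _ hk']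

-- A's inner fold: the accumulator is a prefix
lemma pvA_fold_acc (cs : List Char) (mm mx : Int) (tail : List Int) (acc : List (List Char)) (prev : Int) :
    tail.foldl (pvFA cs mm mx) (acc, prev) =
      (acc ++ (tail.foldl (pvFA cs mm mx) ([], prev)).1, (tail.foldl (pvFA cs mm mx) ([], prev)).2) := by
  induction tail generalizing acc prev with
  | nil => simp
  | cons pos rest ih =>
    simp only [List.foldl_cons, pvFA]
    by_cases hc : mm < pos - prev ∧ pos - prev < mx
    · simp only [if_pos hc]
      rw [ih, ih ([] ++ [PySem.List.slice cs (some prev) (some pos)]) pos]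
      simp
    · simp only [if_neg hc]
      rw [ih]

-- option fold from a some-state is a fold on the value
lemma pvOptFold (cs : List Char) (mm mx ml : Int) (l : List Int) (v : Int × Int × Int × List (List Char)) :
    l.foldl (fun o i => some (pvG cs mm mx ml o i)) (some v) =
      some (l.foldl (fun v i => pvG cs mm mx ml (some v) i) v) := by
  induction l generalizing v with
  | nil => rfl
  | cons i rest ih => simp only [List.foldl_cons]; rw [ih]

-- B's value-level fold in terms of A's inner fold
lemma pvAux2 (cs : List Char) (mm mx ml : Int) (tail : List Int) (prev c cnt : Int) (lst : List (List Char)) :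
    tail.foldl (fun v i => pvG cs mm mx ml (some v) i) (prev, c, cnt, lst) =
      ((tail.foldl (pvFA cs mm mx) ([], prev)).2,
       c + (tail.length : Int),
       cnt + ((tail.foldl (pvFA cs mm mx) ([], prev)).1.length : Int),
       lst ++ (tail.foldl (pvFA cs mm mx) ([], prev)).1.filter (fun m => (m.length : Int) == ml)) := by
  induction tail generalizing prev c cnt lst with
  | nil => simp
  | cons i rest ih =>
    simp only [List.foldl_cons]
    by_cases hc : mm < i - prev ∧ i - prev < mx
    · rw [show pvG cs mm mx ml (some (prev, c, cnt, lst)) i =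
          (i, c + 1, cnt + 1,
            if ((PySem.List.slice cs (some prev) (some i)).length : Int) == ml
              then lst ++ [PySem.List.slice cs (some prev) (some i)] else lst) from by simp [pvG, hc]]
      rw [ih]
      rw [show pvFA cs mm mx ([], prev) i = ([PySem.List.slice cs (some prev) (some i)], i) from by
        simp [pvFA, hc]]
      rw [pvA_fold_acc cs mm mx rest [PySem.List.slice cs (some prev) (some i)] i]
      by_cases hl : (((PySem.List.slice cs (some prev) (some i)).length : Int) == ml) = true <;>
        simp [hl, Prod.ext_iff] <;> omega
    · rw [show pvG cs mm mx ml (some (prev, c, cnt, lst)) i = (i, c + 1, cnt, lst) from by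
        simp [pvG, hc]]
      rw [ih]
      rw [show pvFA cs mm mx ([], prev) i = ([], i) from by simp [pvFA, hc]]
      simp [Prod.ext_iff]
      omega

-- B's aggregate over a nonempty position list, in terms of A's inner fold
lemma pvSumm_cons (cs : List Char) (mm mx ml : Int) (ptail : List Int) (p0 : Int) :
    (p0 :: ptail).foldl (fun o i => some (pvG cs mm mx ml o i)) none =
      some ((ptail.foldl (pvFA cs mm mx) ([], p0)).2,
            1 + (ptail.length : Int),
            ((ptail.foldl (pvFA cs mm mx) ([], p0)).1.length : Int),
            (ptail.foldl (pvFA cs mm mx) ([], p0)).1.filter (fun m => (m.length : Int) == ml)) := by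
  simp only [List.foldl_cons]
  rw [show pvG cs mm mx ml none p0 = (p0, 1, 0, []) from rfl, pvOptFold, pvAux2]
  simp

-- the two final scans agree key by key
lemma pvScan_eq (cs : List Char) (mm mx nm ml : Int) (pos : List Char → List Int)
    (keys : List (List Char)) (hne : ∀ key ∈ keys, pos key ≠ []) :
    pvAscan cs mm mx nm ml (keys.map fun key => (key, pos key)) =
      pvBfind nm (keys.map fun key =>
        (((pos key).foldl (fun o i => some (pvG cs mm mx ml o i)) none).getD (0, 0, 0, []))) := by
  induction keys with
  | nil => rfl
  | cons key rest ih =>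
    have hrest : ∀ key ∈ rest, pos key ≠ [] := fun x hx => hne x (List.mem_cons_of_mem _ hx)
    obtain ⟨p0, ptail, hp⟩ : ∃ p0 ptail, pos key = p0 :: ptail := by
      rcases h : pos key with _ | ⟨a, b⟩
      · exact absurd h (hne key (List.mem_cons_self))
      · exact ⟨a, b, rfl⟩
    simp only [List.map_cons, pvAscan, hp]
    rw [pvSumm_cons]
    rcases hpt : ptail with _ | ⟨p1, ptail'⟩
    · simp only [Option.getD_some]
      simp only [pvBfind]
      have : ¬ ((2 : Int) ≤ 1 + (([] : List Int).length : Int) ∧ nm < (((([] : List Int).foldl (pvFA cs mm mx) ([], p0)).1.length : Int))) := by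
        simp
      rw [if_neg this]
      exact ih hrest
    · have hne' : (p1 :: ptail') ≠ [] := by simp
      rw [if_neg hne']
      simp only [Option.getD_some]
      simp only [pvBfind]
      have h2 : (2 : Int) ≤ 1 + (((p1 :: ptail').length : Int)) := by
        simp; omega
      by_cases hcnt : nm < ((((p1 :: ptail').foldl (pvFA cs mm mx) ([], p0)).1.length : Int))
      · rw [if_pos hcnt, if_pos ⟨h2, hcnt⟩]
      · rw [if_neg hcnt, if_neg (by exact fun h => hcnt h.2)]
        exact ih hrest

-- ===== VERDICT (by name: the statement is the Claim_ definition above) =====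
theorem mon_extr_nocons_spec : Claim_equal_mon_extr_nocons := by
  intro seq mm mx nm ml k _
  unfold Spec_mon_extr_nocons mon_extr_nocons mon_extr_nocons_alt
  dsimp only
  set cs := seq.toList with hcs
  set l := PySem.List.pyRange 0 ((cs.length : Int) - k + 1) 1 with hl
  set kmerF : Int → List Char := fun i => PySem.List.slice cs (some i) (some (i + k)) with hkmer
  -- keys of both dicts
  have hAkeys : ((l.foldl (pvAstep cs k) PySem.Dict.empty).keys) = PySem.Set.update [] (l.map kmerF) := by
    have := PySem.Dict.keys_foldl_modify_key l kmerF ([] : List Int)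
      (fun _ i => fun ps => ps ++ [i]) PySem.Dict.empty
    simpa [pvAstep, PySem.Dict.keys_empty] using this
  have hBkeys : ((l.foldl (pvBstep cs mm mx ml k) PySem.Dict.empty).keys) = PySem.Set.update [] (l.map kmerF) := by
    have hfun : pvBstep cs mm mx ml k = fun d i => d.insert (kmerF i) (pvG cs mm mx ml (d.get? (kmerF i)) i) := by
      funext d i; exact pvBstep_eq cs mm mx ml k d i
    rw [hfun]
    have := PySem.Dict.keys_foldl_insert_key l kmerF
      (fun d i => pvG cs mm mx ml (d.get? (kmerF i)) i) PySem.Dict.empty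
    simpa [PySem.Dict.keys_empty] using this
  have hAnodup : ((l.foldl (pvAstep cs k) PySem.Dict.empty).keys).Nodup := by
    have := PySem.Dict.nodup_keys_foldl_modify_key l kmerF ([] : List Int)
      (fun _ i => fun ps => ps ++ [i]) PySem.Dict.empty (by simp [PySem.Dict.keys_empty])
    simpa [pvAstep] using this
  have hBnodup : ((l.foldl (pvBstep cs mm mx ml k) PySem.Dict.empty).keys).Nodup := by
    have hfun : pvBstep cs mm mx ml k = fun d i => d.insert (kmerF i) (pvG cs mm mx ml (d.get? (kmerF i)) i) := by
      funext d i; exact pvBstep_eq cs mm mx ml k d i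
    rw [hfun]
    exact PySem.Dict.nodup_keys_foldl_insert_key l kmerF _ PySem.Dict.empty (by simp [PySem.Dict.keys_empty])
  rw [PySem.Dict.items_eq_map_keys _ hAnodup ([] : List Int),
      PySem.Dict.values_eq_map_keys _ hBnodup ((0 : Int), (0 : Int), (0 : Int), ([] : List (List Char)))]
  rw [hAkeys, hBkeys]
  have hposA : ∀ key, (l.foldl (pvAstep cs k) PySem.Dict.empty).getD key [] =
      l.filter (fun i => kmerF i == key) := by
    intro key
    rw [pvA_get]
    rfl
  have hposB : ∀ key, (l.foldl (pvBstep cs mm mx ml k) PySem.Dict.empty).getD key ((0 : Int), (0 : Int), (0 : Int), ([] : List (List Char))) =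
      ((l.filter (fun i => kmerF i == key)).foldl (fun o i => some (pvG cs mm mx ml o i)) none).getD (0, 0, 0, []) := by
    intro key
    rw [PySem.Dict.getD_eq_get?_getD, pvB_get]
    rfl
  have e1 : (fun key => (key, (l.foldl (pvAstep cs k) PySem.Dict.empty).getD key [])) =
      (fun key => (key, l.filter (fun i => kmerF i == key))) :=
    funext fun key => by rw [hposA key]
  have e2 : (fun key => (l.foldl (pvBstep cs mm mx ml k) PySem.Dict.empty).getD key ((0 : Int), (0 : Int), (0 : Int), ([] : List (List Char)))) =
      (fun key => ((l.filter (fun i => kmerF i == key)).foldl (fun o i => some (pvG cs mm mx ml o i)) none).getD (0, 0, 0, [])) :=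
    funext fun key => by rw [hposB key]
  rw [e1, e2]
  apply pvScan_eq cs mm mx nm ml (fun key => l.filter (fun i => kmerF i == key))
  intro key hkey
  have : key ∈ l.map kmerF := by
    have := (PySem.Set.mem_update ([] : PySem.Set (List Char)) (l.map kmerF) key).mp hkey
    simpa using this
  obtain ⟨i, hi, rfl⟩ := List.mem_map.mp this
  intro hfil
  exact absurd (beq_self_eq_true (kmerF i)) (by simpa using List.filter_eq_nil_iff.mp hfil i hi)
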